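-- pv_equiv track=rewrite | github.com/pandas-dev/pandas | myenv/lib/python3.12/site-packages/odf/opendocument.py | __fixXmlPart
-- ===== SOURCE A (Python) =====
-- def __fixXmlPart(xmlpart):
--     """
--     fixes an xml code when it does not contain a set of requested
--     "xmlns:whatever" declarations.
--     added by G.K. on 2014/10/21
--     @param xmlpart unicode string: some XML code
--     @return fixed XML code
--     """
--     result=xmlpart
--     requestedPrefixes = (u'meta', u'config', u'dc', u'style',
--                          u'svg', u'fo',u'draw', u'table',u'form')
--     for prefix in requestedPrefixes:
--         if u' xmlns:{prefix}'.format(prefix=prefix) not in xmlpart: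
--             ###########################################
--             # fixed a bug triggered by math elements
--             # Notice: math elements are creectly exported to XHTML
--             #         and best viewed with MathJax javascript.
--             # 2016-02-19 G.K.
--             ###########################################
--             try:
--                 pos=result.index(u" xmlns:")
--                 toInsert=u' xmlns:{prefix}="urn:oasis:names:tc:opendocument:xmlns:{prefix}:1.0"'.format(prefix=prefix)
--                 result=result[:pos]+toInsert+result[pos:]
--             except:
--                 pass
--     return result
-- ===== SOURCE B (Python) =====
-- def __fixXmlPart(xmlpart):
--     """Collect-then-insert rewrite: find the missing prefixes against the
--     original string, then splice all their declarations (in reverse order)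
--     at the first ' xmlns:' position in one go."""
--     requestedPrefixes = (u'meta', u'config', u'dc', u'style',
--                         u'svg', u'fo', u'draw', u'table', u'form')
--     missing = [p for p in requestedPrefixes if u' xmlns:%s' % p not in xmlpart]
--     if u' xmlns:' not in xmlpart:
--         return xmlpart
--     pos = xmlpart.index(u' xmlns:')
--     toInsert = u''.join(
--         u' xmlns:%s="urn:oasis:names:tc:opendocument:xmlns:%s:1.0"' % (p, p)
--         for p in reversed(missing))
--     return xmlpart[:pos] + toInsert + xmlpart[pos:]
-- ===== Notes on version B (the rewrite author's own statement) =====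
-- stated objective: alternative
-- what changed: B collects the missing prefixes in one pass over the original string and splices all their declarations, in reverse order, at the position of the first xmlns declaration in a single concatenation, instead of A's loop of repeated index-and-splice operations on the growing result string.
import Mathlib
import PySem

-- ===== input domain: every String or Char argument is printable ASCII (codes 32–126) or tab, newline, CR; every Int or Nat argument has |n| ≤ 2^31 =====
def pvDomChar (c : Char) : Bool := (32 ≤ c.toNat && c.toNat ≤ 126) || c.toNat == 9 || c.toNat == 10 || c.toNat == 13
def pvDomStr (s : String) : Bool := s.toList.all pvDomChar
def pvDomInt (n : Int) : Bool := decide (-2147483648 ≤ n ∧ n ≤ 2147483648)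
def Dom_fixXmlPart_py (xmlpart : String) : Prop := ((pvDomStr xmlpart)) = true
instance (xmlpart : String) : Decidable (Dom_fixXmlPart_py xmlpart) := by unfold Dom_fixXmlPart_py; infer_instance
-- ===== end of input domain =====

-- B collects the missing prefixes against the original string and splices all
-- declarations at the first ' xmlns:' position in one concatenation (alternative
-- decomposition of A's repeated index-and-splice loop).


-- ===== PORT A =====
-- shared literal pieces of both Pythons (exact: ' xmlns:' and the format string)
def pvNeedle : List Char := [' ', 'x', 'm', 'l', 'n', 's', ':']
def pvDecl (p : List Char) : List Char :=
  pvNeedle ++ p ++ "=\"urn:oasis:names:tc:opendocument:xmlns:".toList ++ p ++ ":1.0\"".toList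
def pvPrefixes : List (List Char) :=
  ["meta".toList, "config".toList, "dc".toList, "style".toList, "svg".toList,
   "fo".toList, "draw".toList, "table".toList, "form".toList]

-- A's for-loop over the requested prefixes; result is the evolving string,
-- the membership test reads the ORIGINAL xml; .index failure (try/except) = find -1.
def fixXmlPart_py_loop (xml : List Char) (ps : List (List Char)) (result : List Char) : List Char :=
  match ps with
  | [] => result
  | p :: rest =>
      if PySem.Chars.isIn (pvNeedle ++ p) xml then
        fixXmlPart_py_loop xml rest result
      else
        let pos := PySem.Chars.find result pvNeedle
        if pos = -1 then
          fixXmlPart_py_loop xml rest result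
        else
          fixXmlPart_py_loop xml rest
            (PySem.List.slice result none (some pos) ++ pvDecl p ++
             PySem.List.slice result (some pos) none)

def fixXmlPart_py (xmlpart : String) : String :=
  String.ofList (fixXmlPart_py_loop xmlpart.toList pvPrefixes xmlpart.toList)

-- ===== PORT B =====
def fixXmlPart_py_alt (xmlpart : String) : String :=
  let s := xmlpart.toList
  let missing := pvPrefixes.filter (fun p => !PySem.Chars.isIn (pvNeedle ++ p) s)
  if PySem.Chars.isIn pvNeedle s then
    let pos := (PySem.Chars.find s pvNeedle).toNat
    String.ofList (s.take pos ++ (missing.reverse.map pvDecl).flatten ++ s.drop pos)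
  else xmlpart

-- ===== PRECONDITION & SPEC =====
def Spec_fixXmlPart_py (xmlpart : String) (out : String) : Prop := out = fixXmlPart_py_alt xmlpart
instance (xmlpart : String) (out : String) : Decidable (Spec_fixXmlPart_py xmlpart out) := by unfold Spec_fixXmlPart_py; infer_instance

-- ===== CLAIM (what is proved, stated in full; the proofs are below) =====
def Claim_equal_fixXmlPart_py : Prop := ∀ (xmlpart : String), Dom_fixXmlPart_py xmlpart → Spec_fixXmlPart_py xmlpart (fixXmlPart_py xmlpart)

-- ===== LEMMAS AND PROOFS =====

-- find s sub = n follows from an occurrence at n and none before it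
theorem pv_find_eq_of (s sub : List Char) (n : Nat)
    (h1 : sub <+: s.drop n) (h2 : ∀ i, i < n → ¬ sub <+: s.drop i) :
    PySem.Chars.find s sub = (n : Int) := by
  have hin : PySem.Chars.isIn sub s = true :=
    (PySem.Chars.exists_prefix_drop_iff_isIn (s := s) (sub := sub)).1 ⟨n, h1⟩
  have hnn : 0 ≤ PySem.Chars.find s sub := by
    rw [PySem.Chars.find_nonneg_iff]
    exact (PySem.Chars.isIn_iff_infix _ _).1 hin
  obtain ⟨hocc, hmin⟩ := PySem.Chars.find_spec (s := s) (sub := sub) hnn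
  set f := (PySem.Chars.find s sub).toNat with hf
  have : f = n := by
    rcases lt_trichotomy f n with h | h | h
    · exact absurd hocc (h2 f h)
    · exact h
    · exact absurd h1 (hmin n h)
  omega

-- inserting 'needle ++ tail' at the first occurrence keeps the first occurrence
theorem pv_find_insert (pre suf tail : List Char)
    (h : PySem.Chars.find (pre ++ suf) pvNeedle = (pre.length : Int)) :
    PySem.Chars.find (pre ++ (pvNeedle ++ tail) ++ suf) pvNeedle = (pre.length : Int) := by
  have hnn : 0 ≤ PySem.Chars.find (pre ++ suf) pvNeedle := by
    rw [h]; exact Int.natCast_nonneg _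
  obtain ⟨hocc, hmin⟩ := PySem.Chars.find_spec (s := pre ++ suf) (sub := pvNeedle) hnn
  have htn : (PySem.Chars.find (pre ++ suf) pvNeedle).toNat = pre.length := by
    rw [h]; exact Int.toNat_natCast _
  rw [htn] at hocc hmin
  apply pv_find_eq_of
  · rw [List.append_assoc, List.drop_left]
    exact (pvNeedle.prefix_append tail).trans ((pvNeedle ++ tail).prefix_append suf)
  · intro i hi hp
    rw [List.append_assoc, List.drop_append_of_le_length (le_of_lt hi)] at hp
    have h7 : pvNeedle.length = 7 := rfl
    by_cases hk7 : 7 ≤ pre.length - i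
    · -- the match lies entirely inside pre: contradicts minimality in pre ++ suf
      apply hmin i hi
      rw [List.drop_append_of_le_length (le_of_lt hi)]
      have heq := (List.prefix_iff_eq_take).1 hp
      rw [h7, List.take_append_of_le_length (by simp; omega)] at heq
      rw [List.prefix_iff_eq_take, h7, List.take_append_of_le_length (by simp; omega)]
      exact heq
    · -- the match straddles the boundary: forces a self-overlap of ' xmlns:'
      exfalso
      obtain ⟨k, hk1, hk6, hklen⟩ : ∃ k, 1 ≤ k ∧ k ≤ 6 ∧ (pre.drop i).length = k :=
        ⟨pre.length - i, by omega, by omega, by simp⟩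
      have heq := (List.prefix_iff_eq_take).1 hp
      rw [h7] at heq
      have hdrop := congrArg (List.drop k) heq
      rw [List.drop_take, List.drop_left' hklen,
          List.take_append_of_le_length (by simp [h7]; omega),
          List.take_append_of_le_length (by rw [h7]; omega)] at hdrop
      interval_cases k <;> revert hdrop <;> decide

-- the loop invariant: the first ' xmlns:' occurrence stays at pre.length,
-- so each inserted declaration stacks up right after pre, newest first
theorem pv_loop_eq (xml : List Char) (ps : List (List Char)) (pre suf : List Char)
    (hfind : PySem.Chars.find (pre ++ suf) pvNeedle = (pre.length : Int)) :
    fixXmlPart_py_loop xml ps (pre ++ suf)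
      = pre ++ ((ps.filter (fun p => !PySem.Chars.isIn (pvNeedle ++ p) xml)).reverse.map pvDecl).flatten ++ suf := by
  induction ps generalizing suf with
  | nil => simp [fixXmlPart_py_loop]
  | cons p rest ih =>
      simp only [fixXmlPart_py_loop]
      by_cases hin : PySem.Chars.isIn (pvNeedle ++ p) xml
      · rw [if_pos hin, ih suf hfind]
        simp [hin]
      · rw [if_neg hin]
        simp only [hfind]
        rw [if_neg (show ¬((pre.length : Int) = -1) by omega)]
        rw [PySem.List.slice_to _ (Int.natCast_nonneg _), PySem.List.slice_from _ (Int.natCast_nonneg _),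
            Int.toNat_natCast, List.take_left, List.drop_left]
        have hfind' : PySem.Chars.find (pre ++ (pvDecl p ++ suf)) pvNeedle = (pre.length : Int) := by
          have := pv_find_insert pre suf
            (p ++ "=\"urn:oasis:names:tc:opendocument:xmlns:".toList ++ p ++ ":1.0\"".toList) hfind
          simpa [pvDecl, List.append_assoc] using this
        rw [show pre ++ pvDecl p ++ suf = pre ++ (pvDecl p ++ suf) from List.append_assoc _ _ _,
            ih (pvDecl p ++ suf) hfind']
        simp [hin, List.flatten_append, List.append_assoc]

theorem pv_loop_none (xml : List Char) (ps : List (List Char)) (r : List Char)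
    (h : PySem.Chars.find r pvNeedle = -1) :
    fixXmlPart_py_loop xml ps r = r := by
  induction ps with
  | nil => rfl
  | cons p rest ih =>
      simp only [fixXmlPart_py_loop, h, reduceIte]
      split_ifs with h1 <;> exact ih

-- ===== VERDICT (by name: the statement is the Claim_ definition above) =====
theorem fixXmlPart_py_spec : Claim_equal_fixXmlPart_py := by
  intro xmlpart _
  unfold Spec_fixXmlPart_py fixXmlPart_py fixXmlPart_py_alt
  set s := xmlpart.toList with hs
  by_cases hin : PySem.Chars.isIn pvNeedle s = true
  · have hinf := (PySem.Chars.isIn_iff_infix _ _).1 hin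
    have hnn : 0 ≤ PySem.Chars.find s pvNeedle := (PySem.Chars.find_nonneg_iff _ _).2 hinf
    set n := (PySem.Chars.find s pvNeedle).toNat with hn
    have hle : n ≤ s.length := by
      have := PySem.Chars.find_le_length (s := s) (sub := pvNeedle)
      omega
    have hsplit : s = s.take n ++ s.drop n := (List.take_append_drop n s).symm
    have hlen : (s.take n).length = n := by simp [hle]
    have hfind : PySem.Chars.find (s.take n ++ s.drop n) pvNeedle = ((s.take n).length : Int) := by
      rw [← hsplit, hlen, hn, Int.toNat_of_nonneg hnn]
    rw [if_pos hin]
    rw [show fixXmlPart_py_loop s pvPrefixes s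
          = fixXmlPart_py_loop s pvPrefixes (s.take n ++ s.drop n) by rw [← hsplit]]
    rw [pv_loop_eq s pvPrefixes (s.take n) (s.drop n) hfind]
  · have hfneg : PySem.Chars.find s pvNeedle = -1 := by
      rw [PySem.Chars.find_eq_neg_one_iff]
      intro hinf
      exact hin ((PySem.Chars.isIn_iff_infix _ _).2 hinf)
    rw [if_neg hin, pv_loop_none s pvPrefixes s hfneg, hs]
    simp
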